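-- pv_equiv track=rewrite | github.com/Kriegspiel/bot-haiku | bot.py | new_recent_items
-- ===== SOURCE A (Python) =====
-- def new_recent_items(previous: list[str], current: list[str]) -> list[str]:
--     if not previous:
--         return current
--     best_overlap = 0
--     max_overlap = min(len(previous), len(current))
--     for size in range(max_overlap, 0, -1):
--         if previous[-size:] == current[:size]:
--             best_overlap = size
--             break
--     return current[best_overlap:]
-- ===== SOURCE B (Python) =====
-- # B: KMP. Build the prefix function of `current` once, then run the KMP
-- # automaton over `previous`; the final state is the longest prefix of
-- # `current` that is a suffix of `previous` -- exactly A's best_overlap --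
-- # in O(len(previous) + len(current)) instead of A's O(n*min) slice scan.
--
-- def _kmp_step(pattern, pi, state, c):
--     while state and (state == len(pattern) or pattern[state] != c):
--         state = pi[state - 1]
--     if state < len(pattern) and pattern[state] == c:
--         state += 1
--     return state
--
-- def new_recent_items(previous, current):
--     m = len(current)
--     pi = [0] * m
--     k = 0
--     for i in range(1, m):
--         k = _kmp_step(current, pi, k, current[i])
--         pi[i] = k
--     state = 0
--     for item in previous:
--         state = _kmp_step(current, pi, state, item)
--     return current[state:]
-- ===== Notes on version B (the rewrite author's own statement) =====
-- stated objective: faster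
-- what changed: Replaced A's descending scan over overlap sizes with O(length) slice comparisons at each size by a KMP prefix-function automaton run over previous, whose final state is the longest current-prefix/previous-suffix overlap.
import Mathlib
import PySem

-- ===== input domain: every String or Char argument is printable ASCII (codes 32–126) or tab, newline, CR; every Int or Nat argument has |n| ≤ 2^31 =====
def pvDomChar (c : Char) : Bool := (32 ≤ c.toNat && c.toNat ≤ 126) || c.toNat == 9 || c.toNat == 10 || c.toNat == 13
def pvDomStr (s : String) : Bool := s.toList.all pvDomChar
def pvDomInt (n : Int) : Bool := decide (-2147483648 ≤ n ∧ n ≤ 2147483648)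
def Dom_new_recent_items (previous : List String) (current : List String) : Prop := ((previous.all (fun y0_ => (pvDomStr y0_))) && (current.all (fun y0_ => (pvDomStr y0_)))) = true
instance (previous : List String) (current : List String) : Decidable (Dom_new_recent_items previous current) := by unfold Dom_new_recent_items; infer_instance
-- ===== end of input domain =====

-- B replaces A's descending overlap-size scan (one slice comparison per size) by a KMP
-- prefix-function automaton run over `previous`; same return value, different algorithm.

-- ===== PORT A =====
-- 'for size in range(max_overlap, 0, -1): if previous[-size:] == current[:size]: best_overlap = size; break'
-- (loop with break → the first matching size of the descending range, else best_overlap stays 0)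
def aLoop (previous current : List String) : List Int → Int
  | [] => 0
  | s :: rest =>
    if PySem.List.slice previous (some (-s)) none = PySem.List.slice current none (some s)
    then s
    else aLoop previous current rest

def new_recent_items (previous : List String) (current : List String) : List String :=
  if previous = [] then current
  else
    let maxOverlap : Int := min (previous.length : Int) (current.length : Int)
    let best := aLoop previous current (PySem.List.pyRange maxOverlap 0 (-1))
    PySem.List.slice current (some best) none   -- current[best_overlap:]

-- ===== PORT B =====
-- _kmp_step's 'while state and (state == len(pattern) or pattern[state] != c): state = pi[state-1]',
-- ported with fuel = the initial state (each fallback strictly decreases the state, so this fuel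
-- always suffices); the reads pattern[state] / pi[state-1] are in range whenever Python evaluates
-- them, ported as getD.
def kmpFb (p : List String) (tbl : List Nat) : Nat → Nat → String → Nat
  | 0, q, _ => q
  | f + 1, q, c =>
    if q ≠ 0 ∧ (q = p.length ∨ ¬ p.getD q "" = c) then kmpFb p tbl f (tbl.getD (q - 1) 0) c
    else q

-- then 'if state < len(pattern) and pattern[state] == c: state += 1; return state'
def kmpStep (p : List String) (tbl : List Nat) (q : Nat) (c : String) : Nat :=
  let q' := kmpFb p tbl q q c
  if q' < p.length ∧ p.getD q' "" = c then q' + 1 else q'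

-- 'pi = [0]*m; k = 0; for i in range(1, m): k = _kmp_step(current, pi, k, current[i]); pi[i] = k'
-- (built by appending: in Python the entries beyond the write frontier are 0 and are never read)
def buildPi (p : List String) : List Nat :=
  if p.length = 0 then []
  else
    ((List.range' 1 (p.length - 1)).foldl
      (fun (acc : List Nat × Nat) i =>
        let k := kmpStep p acc.1 acc.2 (p.getD i "")
        (acc.1 ++ [k], k)) ([0], 0)).1

-- 'state = 0; for item in previous: state = _kmp_step(current, pi, state, item); return current[state:]'
def new_recent_items_alt (previous : List String) (current : List String) : List String :=
  let tbl := buildPi current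
  let state := previous.foldl (fun q item => kmpStep current tbl q item) 0
  current.drop state   -- current[state:] with 0 ≤ state

-- ===== PRECONDITION & SPEC =====
def Spec_new_recent_items (previous : List String) (current : List String) (out : List String) : Prop := out = new_recent_items_alt previous current
instance (previous : List String) (current : List String) (out : List String) : Decidable (Spec_new_recent_items previous current out) := by unfold Spec_new_recent_items; infer_instance

-- ===== CLAIM (what is proved, stated in full; the proofs are below) =====
def Claim_equal_new_recent_items : Prop := ∀ (previous : List String) (current : List String), Dom_new_recent_items previous current → Spec_new_recent_items previous current (new_recent_items previous current)

-- ===== LEMMAS AND PROOFS =====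

-- `MaxM p t r`: r is the largest k ≤ |p| such that p.take k is a suffix of t.
def MaxM (p t : List String) (r : Nat) : Prop :=
  r ≤ p.length ∧ p.take r <:+ t ∧ ∀ k, k ≤ p.length → p.take k <:+ t → k ≤ r

-- `PiOk p tbl n`: the first n entries of tbl are the KMP prefix function of p.
def PiOk (p : List String) (tbl : List Nat) (n : Nat) : Prop :=
  ∀ j, j < n → tbl.getD j 0 ≤ j ∧ p.take (tbl.getD j 0) <:+ p.take (j + 1) ∧
    ∀ k, k ≤ j → p.take k <:+ p.take (j + 1) → k ≤ tbl.getD j 0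

-- invariant carried through the fallback loop, relative to the extended text t ++ [c]
def Inv2 (p t : List String) (c : String) (q : Nat) : Prop :=
  q ≤ p.length ∧ p.take q <:+ t ∧ ∀ k, k ≤ p.length → p.take k <:+ t ++ [c] → k ≤ q + 1

lemma take_succ_getElem (p : List String) (j : Nat) (h : j < p.length) :
    p.take (j + 1) = p.take j ++ [p[j]] := by
  rw [List.take_add_one]; simp [List.getElem?_eq_getElem h]

lemma concat_suffix_concat (xs t : List String) (a c : String) :
    (xs ++ [a]) <:+ (t ++ [c]) ↔ xs <:+ t ∧ a = c := by
  rw [← List.reverse_prefix]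
  simp only [List.reverse_append, List.reverse_cons, List.reverse_nil, List.nil_append,
    List.cons_append, List.cons_prefix_cons, List.reverse_prefix]
  tauto

lemma length_take_of_le {p : List String} {k : Nat} (h : k ≤ p.length) :
    (p.take k).length = k := by
  simp [List.length_take]; omega

lemma ext_iff (p t : List String) (c : String) (j : Nat) (hj : j < p.length) :
    p.take (j + 1) <:+ t ++ [c] ↔ p.take j <:+ t ∧ p.getD j "" = c := by
  rw [take_succ_getElem p j hj, concat_suffix_concat, List.getD_eq_getElem p "" hj]

lemma take_suffix_take {p t : List String} {k q : Nat} (hk : k ≤ p.length) (hq : q ≤ p.length)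
    (hkq : k ≤ q) (h1 : p.take k <:+ t) (h2 : p.take q <:+ t) : p.take k <:+ p.take q :=
  List.suffix_of_suffix_length_le h1 h2
    (by rw [length_take_of_le hk, length_take_of_le hq]; exact hkq)

lemma maxm_nil (p : List String) : MaxM p [] 0 := by
  refine ⟨Nat.zero_le _, by simp, ?_⟩
  intro k hk hs
  have := hs.length_le
  rw [length_take_of_le hk] at this
  simpa using this

lemma maxm_inv2 {p t : List String} {q : Nat} (c : String) (h : MaxM p t q) : Inv2 p t c q := by
  obtain ⟨h1, h2, h3⟩ := h
  refine ⟨h1, h2, ?_⟩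
  intro k hk hs
  match k with
  | 0 => omega
  | j + 1 =>
    have hj : j < p.length := by omega
    rw [ext_iff p t c j hj] at hs
    have := h3 j (by omega) hs.1
    omega

lemma fb_ok (p : List String) (tbl : List Nat) (t : List String) (c : String) (n : Nat)
    (hpi : PiOk p tbl n) :
    ∀ f q, q ≤ f → q ≤ n → Inv2 p t c q →
      (kmpFb p tbl f q c = 0 ∨
        (kmpFb p tbl f q c < p.length ∧ p.getD (kmpFb p tbl f q c) "" = c)) ∧
      Inv2 p t c (kmpFb p tbl f q c) := by
  intro f
  induction f with
  | zero =>
    intro q hqf _ hInv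
    have hq0 : q = 0 := by omega
    subst hq0
    exact ⟨Or.inl rfl, hInv⟩
  | succ f ih =>
    intro q hqf hqn hInv
    by_cases hcond : q ≠ 0 ∧ (q = p.length ∨ ¬ p.getD q "" = c)
    · rw [show kmpFb p tbl (f + 1) q c = kmpFb p tbl f (tbl.getD (q - 1) 0) c from by
        simp only [kmpFb, if_pos hcond]]
      have hq0 : q ≠ 0 := hcond.1
      obtain ⟨hle, hsuf, hmax⟩ := hpi (q - 1) (by omega)
      have hq1 : q - 1 + 1 = q := by omega
      rw [hq1] at hsuf hmax
      obtain ⟨hm, hst, hbd⟩ := hInv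
      refine ih (tbl.getD (q - 1) 0) (by omega) (by omega) ⟨by omega, hsuf.trans hst, ?_⟩
      intro k hk hs
      have hkq1 : k ≤ q + 1 := hbd k hk hs
      match k with
      | 0 => omega
      | j + 1 =>
        have hjp : j < p.length := by omega
        rw [ext_iff p t c j hjp] at hs
        have hjq : j ≠ q := by
          intro hjq; subst hjq
          rcases hcond.2 with hqm | hne
          · omega
          · exact hne hs.2
        have : p.take j <:+ p.take q :=
          take_suffix_take (by omega) hm (by omega) hs.1 hst
        have := hmax j (by omega) this
        omega
    · rw [show kmpFb p tbl (f + 1) q c = q from by simp only [kmpFb, if_neg hcond]]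
      refine ⟨?_, hInv⟩
      by_cases hq0 : q = 0
      · exact Or.inl hq0
      · have h2 : ¬ (q = p.length ∨ ¬ p.getD q "" = c) := fun h => hcond ⟨hq0, h⟩
        have hqm : q ≠ p.length := fun h => h2 (Or.inl h)
        refine Or.inr ⟨by have := hInv.1; omega, ?_⟩
        by_cases hc : p.getD q "" = c
        · exact hc
        · exact absurd (Or.inr hc) h2

lemma step_ok (p : List String) (tbl : List Nat) (t : List String) (c : String) (n : Nat)
    (hpi : PiOk p tbl n) (q : Nat) (hqn : q ≤ n) (hq : MaxM p t q) :
    MaxM p (t ++ [c]) (kmpStep p tbl q c) := by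
  obtain ⟨hstop, hInv⟩ := fb_ok p tbl t c n hpi q q le_rfl hqn (maxm_inv2 c hq)
  unfold kmpStep
  obtain ⟨hrm, hrs, hrb⟩ := hInv
  by_cases hcond : kmpFb p tbl q q c < p.length ∧ p.getD (kmpFb p tbl q q c) "" = c
  · rw [if_pos hcond]
    refine ⟨by omega, ?_, ?_⟩
    · rw [ext_iff p t c _ hcond.1]; exact ⟨hrs, hcond.2⟩
    · intro k hk hs; exact hrb k hk hs
  · rw [if_neg hcond]
    have hr0 : kmpFb p tbl q q c = 0 := by
      rcases hstop with h0 | hgood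
      · exact h0
      · exact absurd hgood hcond
    rw [hr0]
    refine ⟨Nat.zero_le _, by simp, ?_⟩
    intro k hk hs
    match k with
    | 0 => omega
    | j + 1 =>
      have hjp : j < p.length := by omega
      have hs' := hs
      rw [ext_iff p t c j hjp] at hs'
      have : j + 1 ≤ kmpFb p tbl q q c + 1 := hrb (j + 1) hk hs
      rw [hr0] at this
      have hj0 : j = 0 := by omega
      subst hj0
      rw [hr0] at hcond
      exact absurd ⟨by omega, hs'.2⟩ hcond

lemma fold_ok (p : List String) (tbl : List Nat) (hpi : PiOk p tbl p.length) :
    ∀ (rest t : List String) (q : Nat), MaxM p t q →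
      MaxM p (t ++ rest) (rest.foldl (fun q item => kmpStep p tbl q item) q) := by
  intro rest
  induction rest with
  | nil => intro t q hq; simpa using hq
  | cons x xs ih =>
    intro t q hq
    have h1 := step_ok p tbl t x p.length hpi q hq.1 hq
    have h2 := ih (t ++ [x]) (kmpStep p tbl q x) h1
    simpa [List.append_assoc] using h2

lemma buildPi_fold_ok (p : List String) :
    ∀ j, j + 1 ≤ p.length →
      ((((List.range' 1 j).foldl
        (fun (acc : List Nat × Nat) i =>
          let k := kmpStep p acc.1 acc.2 (p.getD i "")
          (acc.1 ++ [k], k)) ([0], 0)).1.length = j + 1) ∧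
      PiOk p ((List.range' 1 j).foldl
        (fun (acc : List Nat × Nat) i =>
          let k := kmpStep p acc.1 acc.2 (p.getD i "")
          (acc.1 ++ [k], k)) ([0], 0)).1 (j + 1) ∧
      MaxM p ((p.take (j + 1)).drop 1) ((List.range' 1 j).foldl
        (fun (acc : List Nat × Nat) i =>
          let k := kmpStep p acc.1 acc.2 (p.getD i "")
          (acc.1 ++ [k], k)) ([0], 0)).2) := by
  intro j
  induction j with
  | zero =>
    intro _
    refine ⟨rfl, ?_, ?_⟩
    · intro j hj1
      have hj0 : j = 0 := by omega
      subst hj0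
      exact ⟨le_rfl, by simp, fun k hk _ => hk⟩
    · have h1 : (p.take 1).drop 1 = [] := by cases p <;> simp
      rw [h1]
      exact maxm_nil p
  | succ j ih =>
    intro hj
    obtain ⟨hlen, hpi, hmm⟩ := ih (by omega)
    have hrange : List.range' 1 (j + 1) = List.range' 1 j ++ [1 + j] := by
      simpa using List.range'_concat (s := 1) (n := j) (step := 1)
    rw [hrange, List.foldl_append]
    set st := (List.range' 1 j).foldl
      (fun (acc : List Nat × Nat) i =>
        let k := kmpStep p acc.1 acc.2 (p.getD i "")
        (acc.1 ++ [k], k)) ([0], 0) with hst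
    simp only [List.foldl_cons, List.foldl_nil]
    have hjlt : j + 1 < p.length := by omega
    have htlen : ((p.take (j + 1)).drop 1).length = j := by
      rw [List.length_drop, length_take_of_le (by omega)]; omega
    have hqj : st.2 ≤ j := by
      have := hmm.2.1.length_le
      rw [length_take_of_le hmm.1, htlen] at this
      exact this
    have htext : (p.take (j + 1 + 1)).drop 1 = (p.take (j + 1)).drop 1 ++ [p.getD (1 + j) ""] := by
      rw [take_succ_getElem p (j + 1) hjlt,
        List.drop_append_of_le_length (by rw [length_take_of_le (by omega)]; omega),
        List.getD_eq_getElem p "" (show 1 + j < p.length by omega)]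
      simp [Nat.add_comm]
    have hstep : MaxM p ((p.take (j + 1 + 1)).drop 1) (kmpStep p st.1 st.2 (p.getD (1 + j) "")) := by
      rw [htext]
      exact step_ok p st.1 ((p.take (j + 1)).drop 1) (p.getD (1 + j) "") (j + 1) hpi st.2
        (by omega) hmm
    have hnewlen : ((p.take (j + 1 + 1)).drop 1).length = j + 1 := by
      rw [List.length_drop, length_take_of_le (by omega)]; omega
    refine ⟨by simp [hlen], ?_, hstep⟩
    -- PiOk extended to the new entry
    intro jj hjj
    by_cases hlt : jj < j + 1
    · have hgd : (st.1 ++ [kmpStep p st.1 st.2 (p.getD (1 + j) "")]).getD jj 0 = st.1.getD jj 0 :=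
        List.getD_append _ _ _ _ (by omega)
      rw [hgd]
      exact hpi jj hlt
    · have hjj1 : jj = j + 1 := by omega
      subst hjj1
      have hgd : (st.1 ++ [kmpStep p st.1 st.2 (p.getD (1 + j) "")]).getD (j + 1) 0 =
          kmpStep p st.1 st.2 (p.getD (1 + j) "") := by
        rw [List.getD_append_right _ _ _ _ (by omega), hlen]
        simp
      rw [hgd]
      obtain ⟨hkm, hks, hkb⟩ := hstep
      have hdropsuf : (p.take (j + 1 + 1)).drop 1 <:+ p.take (j + 1 + 1) := List.drop_suffix _ _
      refine ⟨?_, hks.trans hdropsuf, ?_⟩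
      · have := hks.length_le
        rw [length_take_of_le hkm, hnewlen] at this
        exact this
      · intro k hk hsuf
        have hksuf : p.take k <:+ (p.take (j + 1 + 1)).drop 1 :=
          List.suffix_of_suffix_length_le hsuf hdropsuf
            (by rw [length_take_of_le (by omega), hnewlen]; omega)
        exact hkb k (by omega) hksuf

lemma alt_char (previous current : List String) :
    ∃ r, MaxM current previous r ∧ new_recent_items_alt previous current = current.drop r := by
  have hpi : PiOk current (buildPi current) current.length := by
    by_cases hm : current.length = 0
    · intro j hj; omega
    · unfold buildPi
      rw [if_neg hm]
      have := (buildPi_fold_ok current (current.length - 1) (by omega)).2.1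
      rwa [Nat.sub_add_cancel (by omega)] at this
  refine ⟨previous.foldl (fun q item => kmpStep current (buildPi current) q item) 0, ?_, rfl⟩
  have := fold_ok current (buildPi current) hpi previous [] 0 (maxm_nil current)
  simpa using this

lemma suffix_iff_drop_eq (prev cur : List String) (k : Nat) (hk : k ≤ cur.length)
    (hkp : k ≤ prev.length) :
    prev.drop (prev.length - k) = cur.take k ↔ cur.take k <:+ prev := by
  constructor
  · intro h; rw [← h]; exact List.drop_suffix _ _
  · rintro ⟨u, hu⟩
    subst hu
    rw [List.length_append, length_take_of_le hk,
      show u.length + k - k = u.length from by omega, List.drop_left]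

lemma aLoop_ok (previous current : List String) :
    ∀ b : Nat, b ≤ previous.length → b ≤ current.length →
      (∀ k, k ≤ current.length → current.take k <:+ previous → k ≤ b) →
      ∃ r : Nat, aLoop previous current (PySem.List.pyRange (b : Int) 0 (-1)) = (r : Int) ∧
        MaxM current previous r := by
  intro b
  induction b with
  | zero =>
    intro _ _ hbd
    rw [PySem.List.pyRange_neg_one_eq_nil (by norm_num)]
    exact ⟨0, rfl, ⟨Nat.zero_le _, by simp, hbd⟩⟩
  | succ b ih =>
    intro hbp hbc hbd
    rw [PySem.List.pyRange_neg_one_cons (show (0 : Int) < ((b + 1 : Nat) : Int) by push_cast; omega)]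
    have hcast : ((b + 1 : Nat) : Int) - 1 = ((b : Nat) : Int) := by push_cast; ring
    rw [hcast]
    simp only [aLoop]
    rw [PySem.List.slice_from_neg_natCast previous (b + 1) (by omega),
      PySem.List.slice_to_natCast current (b + 1)]
    by_cases hmatch : previous.drop (previous.length - (b + 1)) = current.take (b + 1)
    · rw [if_pos hmatch]
      refine ⟨b + 1, rfl, by omega, ?_, hbd⟩
      exact (suffix_iff_drop_eq previous current (b + 1) hbc hbp).mp hmatch
    · rw [if_neg hmatch]
      refine ih (by omega) (by omega) ?_
      intro k hk hs
      have hk1 : k ≤ b + 1 := hbd k hk hs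
      rcases Nat.lt_or_ge k (b + 1) with h | h
      · omega
      · have hkb : k = b + 1 := by omega
        subst hkb
        exact absurd ((suffix_iff_drop_eq previous current (b + 1) hbc hbp).mpr hs) hmatch

lemma a_char (previous current : List String) :
    ∃ r, MaxM current previous r ∧ new_recent_items previous current = current.drop r := by
  unfold new_recent_items
  by_cases hp : previous = []
  · rw [if_pos hp]
    subst hp
    exact ⟨0, maxm_nil current, by simp⟩
  · rw [if_neg hp]
    obtain ⟨r, hres, hmm⟩ := aLoop_ok previous current (min previous.length current.length)
      (min_le_left _ _) (min_le_right _ _)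
      (by
        intro k hk hs
        have := hs.length_le
        rw [length_take_of_le hk] at this
        omega)
    have hmin : min ((previous.length : Int)) ((current.length : Int)) =
        ((min previous.length current.length : Nat) : Int) := by push_cast; rfl
    refine ⟨r, hmm, ?_⟩
    show PySem.List.slice current
      (some (aLoop previous current (PySem.List.pyRange
        (min (previous.length : Int) (current.length : Int)) 0 (-1)))) none = List.drop r current
    rw [hmin, hres, PySem.List.slice_from_natCast]

lemma maxm_unique {p t : List String} {r r' : Nat} (h : MaxM p t r) (h' : MaxM p t r') :
    r = r' :=
  Nat.le_antisymm (h'.2.2 r h.1 h.2.1) (h.2.2 r' h'.1 h'.2.1)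

-- ===== VERDICT (by name: the statement is the Claim_ definition above) =====
theorem new_recent_items_spec : Claim_equal_new_recent_items := by
  intro previous current _
  unfold Spec_new_recent_items
  obtain ⟨r, hmA, hA⟩ := a_char previous current
  obtain ⟨r', hmB, hB⟩ := alt_char previous current
  rw [hA, hB, maxm_unique hmA hmB]
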